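-- pv_equiv track=rewrite | github.com/aehrc/sparked-fhir-server-configuration | scripts/clear_test_data.py | _order_for_deletion
-- ===== SOURCE A (Python) =====
-- from typing import Dict, List, Optional, Set, Tuple
--
-- RESOURCE_TYPES_DELETE_ORDER = [
--     'Task',
--     'Bundle',
--     'Consent',
--     'CommunicationRequest',
--     'ServiceRequest',
--     'DocumentReference',
--     'MedicationStatement',
--     'MedicationRequest',
--     'Immunization',
--     'AllergyIntolerance',
--     'DiagnosticReport',
--     'Observation',
--     'Procedure',
--     'Condition',
--     'Medication',
--     'Specimen',
--     'Encounter',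
--     'Coverage',
--     'Device',
--     'RelatedPerson',
--     'Patient',
--     'PractitionerRole',
--     'HealthcareService',
--     'Practitioner',
--     'Location',
--     'Organization',
-- ]
--
-- def _order_for_deletion(resources_by_type: Dict[str, List[str]]) -> List[Tuple[str, str]]:
--     """Order resources for deletion: leaf types first, base types last."""
--     # Build type order map — types in RESOURCE_TYPES_DELETE_ORDER get their index,
--     # unknown types go to the front (deleted first since they're likely leaf resources)
--     type_order = {t: i for i, t in enumerate(RESOURCE_TYPES_DELETE_ORDER)}
--
--     ordered_types = sorted(
--         resources_by_type.keys(),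
--         key=lambda t: type_order.get(t, -1)
--     )
--
--     result = []
--     for resource_type in ordered_types:
--         for resource_id in resources_by_type[resource_type]:
--             result.append((resource_type, resource_id))
--
--     return result
-- ===== SOURCE B (Python) =====
-- RESOURCE_TYPES_DELETE_ORDER = [
--     'Task', 'Bundle', 'Consent', 'CommunicationRequest', 'ServiceRequest',
--     'DocumentReference', 'MedicationStatement', 'MedicationRequest',
--     'Immunization', 'AllergyIntolerance', 'DiagnosticReport', 'Observation',
--     'Procedure', 'Condition', 'Medication', 'Specimen', 'Encounter',
--     'Coverage', 'Device', 'RelatedPerson', 'Patient', 'PractitionerRole',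
--     'HealthcareService', 'Practitioner', 'Location', 'Organization',
-- ]
--
-- def _order_for_deletion(resources_by_type):
--     """No sort: unknown types first in dict order, then the predefined order."""
--     result = []
--     for resource_type, ids in resources_by_type.items():
--         if resource_type not in RESOURCE_TYPES_DELETE_ORDER:
--             for resource_id in ids:
--                 result.append((resource_type, resource_id))
--     for resource_type in RESOURCE_TYPES_DELETE_ORDER:
--         if resource_type in resources_by_type:
--             for resource_id in resources_by_type[resource_type]:
--                 result.append((resource_type, resource_id))
--     return result
-- ===== Notes on version B (the rewrite author's own statement) =====
-- stated objective: alternative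
-- what changed: Replaces the sort of the type keys by a deletion-priority key with two direct passes: one over the dict emitting unknown types in insertion order, then one over the predefined order list emitting each present type's resources.
import Mathlib
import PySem

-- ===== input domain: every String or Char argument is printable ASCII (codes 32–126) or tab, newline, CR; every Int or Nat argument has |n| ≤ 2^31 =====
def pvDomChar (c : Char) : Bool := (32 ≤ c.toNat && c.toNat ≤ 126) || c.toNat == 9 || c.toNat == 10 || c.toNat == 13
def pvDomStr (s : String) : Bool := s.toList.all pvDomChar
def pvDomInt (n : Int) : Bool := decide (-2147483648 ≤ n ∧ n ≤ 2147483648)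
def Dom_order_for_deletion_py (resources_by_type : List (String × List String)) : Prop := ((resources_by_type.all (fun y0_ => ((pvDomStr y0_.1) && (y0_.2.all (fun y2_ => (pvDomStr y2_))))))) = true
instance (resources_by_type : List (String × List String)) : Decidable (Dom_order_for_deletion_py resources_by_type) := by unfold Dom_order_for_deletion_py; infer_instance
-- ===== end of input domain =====

-- B replaces A's sort-by-priority-key with two direct passes (unknown types in dict
-- order first, then the predefined order list); same return value, no speed claim.

-- ===== PORT A =====
def pyResourceTypesDeleteOrder : List String :=
  ["Task", "Bundle", "Consent", "CommunicationRequest", "ServiceRequest",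
   "DocumentReference", "MedicationStatement", "MedicationRequest",
   "Immunization", "AllergyIntolerance", "DiagnosticReport", "Observation",
   "Procedure", "Condition", "Medication", "Specimen", "Encounter",
   "Coverage", "Device", "RelatedPerson", "Patient", "PractitionerRole",
   "HealthcareService", "Practitioner", "Location", "Organization"]

def order_for_deletion_py (resources_by_type : List (String × List String)) : List (String × String) :=
  let d : PySem.Dict String (List String) := PySem.Dict.mk resources_by_type
  -- type_order = {t: i for i, t in enumerate(RESOURCE_TYPES_DELETE_ORDER)}
  let type_order : PySem.Dict String Int :=
    (PySem.List.enumerate pyResourceTypesDeleteOrder).foldl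
      (fun acc it => acc.insert it.2 it.1) PySem.Dict.empty
  -- ordered_types = sorted(resources_by_type.keys(), key=lambda t: type_order.get(t, -1))
  let ordered_types := PySem.List.sorted d.keys (fun t => type_order.getD t (-1)) false
  -- result loop; resources_by_type[resource_type]: the key always comes from .keys(),
  -- so Python's [] never raises and getD with default [] is exact here
  ordered_types.foldl
    (fun result t => (d.getD t []).foldl (fun res i => res ++ [(t, i)]) result) []

-- ===== PORT B =====
def order_for_deletion_py_alt (resources_by_type : List (String × List String)) : List (String × String) :=
  let d : PySem.Dict String (List String) := PySem.Dict.mk resources_by_type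
  -- pass 1: types not in the predefined order, in dict insertion order
  let part := d.items.foldl
    (fun acc p => if !pyResourceTypesDeleteOrder.contains p.1
                  then acc ++ p.2.map (fun i => (p.1, i)) else acc) []
  -- pass 2: the predefined order, keeping only types present in the dict
  pyResourceTypesDeleteOrder.foldl
    (fun acc t => if d.contains t
                  then acc ++ (d.getD t []).map (fun i => (t, i)) else acc) part

-- ===== PRECONDITION & SPEC =====
-- Pre_ excludes association lists with duplicate keys: they do not represent any
-- Python dict (the harness's dict collapses them, so both Pythons agree there), and
-- the two ports' list encodings disagree only on such non-dict inputs.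
def Pre_order_for_deletion_py (resources_by_type : List (String × List String)) : Prop :=
  (resources_by_type.map Prod.fst).Nodup
instance (resources_by_type : List (String × List String)) : Decidable (Pre_order_for_deletion_py resources_by_type) := by unfold Pre_order_for_deletion_py; infer_instance

def pvWitness_order_for_deletion_py : (List (String × List String)) :=
  [("Zebra", ["z1"]), ("Patient", ["p1", "p2"]), ("Task", ["t1"])]

def Spec_order_for_deletion_py (resources_by_type : List (String × List String)) (out : List (String × String)) : Prop := out = order_for_deletion_py_alt resources_by_type
instance (resources_by_type : List (String × List String)) (out : List (String × String)) : Decidable (Spec_order_for_deletion_py resources_by_type out) := by unfold Spec_order_for_deletion_py; infer_instance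

-- ===== CLAIM (what is proved, stated in full; the proofs are below) =====
def Claim_equal_order_for_deletion_py : Prop := ∀ (resources_by_type : List (String × List String)), Dom_order_for_deletion_py resources_by_type → Pre_order_for_deletion_py resources_by_type → Spec_order_for_deletion_py resources_by_type (order_for_deletion_py resources_by_type)

-- ===== LEMMAS AND PROOFS =====

-- the priority key A's sort uses, as a plain function of the type name
def pvKf (t : String) : Int :=
  (((PySem.List.enumerate pyResourceTypesDeleteOrder).foldl
      (fun acc it => acc.insert it.2 it.1) PySem.Dict.empty : PySem.Dict String Int)).getD t (-1)

-- the type_order dict's items are exactly the (type, index) pairs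
lemma pvItems_eq :
    (((PySem.List.enumerate pyResourceTypesDeleteOrder).foldl
        (fun acc it => acc.insert it.2 it.1) PySem.Dict.empty : PySem.Dict String Int)).items
      = (PySem.List.enumerate pyResourceTypesDeleteOrder).map (fun it => (it.2, it.1)) := by
  decide

lemma pvKeysNodup :
    (((PySem.List.enumerate pyResourceTypesDeleteOrder).foldl
        (fun acc it => acc.insert it.2 it.1) PySem.Dict.empty : PySem.Dict String Int)).keys.Nodup := by
  decide

lemma pvKf_getElem (k : Nat) (h : k < pyResourceTypesDeleteOrder.length) :
    pvKf pyResourceTypesDeleteOrder[k] = (k : Int) := by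
  unfold pvKf
  apply PySem.Dict.getD_of_mem_items _ _ pvKeysNodup
  rw [pvItems_eq]
  have : ((0 : Int) + k, pyResourceTypesDeleteOrder[k])
      ∈ PySem.List.enumerate pyResourceTypesDeleteOrder := by
    rw [PySem.List.mem_enumerate_iff]; exact ⟨k, h, rfl⟩
  simpa using (List.mem_map_of_mem (f := fun it => (it.2, it.1)) this)

lemma pvKf_neg {t : String} (h : pyResourceTypesDeleteOrder.contains t = false) :
    pvKf t = -1 := by
  unfold pvKf
  apply PySem.Dict.getD_of_not_contains
  rw [PySem.Dict.contains_eq_decide_mem_keys]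
  have hk : (((PySem.List.enumerate pyResourceTypesDeleteOrder).foldl
      (fun acc it => acc.insert it.2 it.1) PySem.Dict.empty : PySem.Dict String Int)).keys
      = pyResourceTypesDeleteOrder := by decide
  rw [hk]
  simpa using h

lemma pvKf_nonneg {t : String} (h : t ∈ pyResourceTypesDeleteOrder) : 0 ≤ pvKf t := by
  obtain ⟨k, hk, rfl⟩ := List.mem_iff_getElem.mp h
  rw [pvKf_getElem k hk]
  exact Int.natCast_nonneg k

lemma pvKf_mono : pyResourceTypesDeleteOrder.Pairwise (fun a b => pvKf a < pvKf b) := by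
  rw [List.pairwise_iff_getElem]
  intro i j hi hj hij
  rw [pvKf_getElem i hi, pvKf_getElem j hj]
  exact_mod_cast hij

lemma pv_insertBy_append_left (before : String → String → Bool) (x : String)
    (U K : List String) (hU : ∀ u ∈ U, before x u = false) :
    PySem.List.insertBy before x (U ++ K) = U ++ PySem.List.insertBy before x K := by
  induction U with
  | nil => simp
  | cons u us ih =>
    have hu : before x u = false := hU u (by simp)
    simp [PySem.List.insertBy, hu, ih (fun v hv => hU v (by simp [hv]))]

lemma pv_insertBy_filter (key : String → Int) (o : List String)
    (ho : o.Pairwise (fun a b => key a < key b)) (x : String) (hx : x ∈ o)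
    (q : String → Bool) (hqx : q x = false) :
    PySem.List.insertBy (fun a b => decide (key a < key b)) x (o.filter q)
      = o.filter (fun t => q t || t == x) := by
  induction o with
  | nil => cases hx
  | cons h tl ih =>
    rw [List.pairwise_cons] at ho
    obtain ⟨hlt, htl⟩ := ho
    by_cases hxh : x = h
    · subst hxh
      have htlq : tl.filter (fun t => q t || t == x) = tl.filter q := by
        apply List.filter_congr
        intro t ht
        have : (t == x) = false := by
          refine beq_false_of_ne ?_
          intro he; subst he; exact absurd (hlt t ht) (lt_irrefl _)
        simp [this]
      simp only [List.filter_cons, hqx, beq_self_eq_true, Bool.or_true, Bool.false_eq_true,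
        reduceIte, if_pos, htlq]
      cases hf : tl.filter q with
      | nil => simp [PySem.List.insertBy]
      | cons y ys =>
        have hy : y ∈ tl := List.mem_of_mem_filter (hf ▸ (by simp : y ∈ y :: ys))
        have : decide (key x < key y) = true := by simp [hlt y hy]
        simp [PySem.List.insertBy, this]
    · have hxtl : x ∈ tl := by cases hx with
        | head => exact absurd rfl hxh
        | tail _ h2 => exact h2
      have hhx : (h == x) = false := beq_false_of_ne (fun he => hxh he.symm)
      have hkey : key h < key x := hlt x hxtl
      by_cases hqh : q h = true
      · simp only [List.filter_cons, hqh, Bool.true_or, if_pos]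
        have : decide (key x < key h) = false := by simp; omega
        simp [PySem.List.insertBy, this, ih htl hxtl]
      · have hqh' : q h = false := by simpa using hqh
        simp only [List.filter_cons, hqh', hhx, Bool.or_self, Bool.false_eq_true,
          reduceIte]
        exact ih htl hxtl

-- the crux: A's stable sort splits into "unknown types in input order" ++ "predefined order"
lemma pv_sorted_split (keys : List String) (hnd : keys.Nodup) :
    PySem.List.sorted keys pvKf false
      = keys.filter (fun t => !pyResourceTypesDeleteOrder.contains t)
        ++ pyResourceTypesDeleteOrder.filter (fun t => keys.contains t) := by
  induction keys using List.reverseRecOn with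
  | nil => simp [PySem.List.sorted_eq_foldl_insertBy]
  | append_singleton p x ih =>
    have hp : p.Nodup := (List.nodup_append.mp hnd).1
    have hxp : x ∉ p := by
      intro hmem
      have := (List.nodup_append.mp hnd).2.2
      exact this x hmem x (List.mem_singleton_self x) rfl
    rw [PySem.List.sorted_eq_foldl_insertBy, List.foldl_append, List.foldl_cons, List.foldl_nil,
      ← PySem.List.sorted_eq_foldl_insertBy, ih hp]
    set U := p.filter (fun t => !pyResourceTypesDeleteOrder.contains t) with hUdef
    set K := pyResourceTypesDeleteOrder.filter (fun t => p.contains t) with hKdef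
    have hUneg : ∀ u ∈ U, pvKf u = -1 := by
      intro u hu
      have := List.of_mem_filter hu
      exact pvKf_neg (by simpa using this)
    by_cases hc : pyResourceTypesDeleteOrder.contains x = true
    · -- known type: skips the unknown block, lands at its slot of the predefined order
      have hxo : x ∈ pyResourceTypesDeleteOrder := by simpa using hc
      have hx0 : 0 ≤ pvKf x := pvKf_nonneg hxo
      rw [pv_insertBy_append_left _ _ _ _ (by
        intro u hu
        have := hUneg u hu
        simp [this]; omega)]
      rw [hKdef, pv_insertBy_filter pvKf _ pvKf_mono x hxo _ (by simpa using hxp)]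
      have hUx : (p ++ [x]).filter (fun t => !pyResourceTypesDeleteOrder.contains t) = U := by
        rw [List.filter_append]
        have : [x].filter (fun t => !pyResourceTypesDeleteOrder.contains t) = [] := by
          simp; exact hxo
        rw [this, List.append_nil]
      have hKx : pyResourceTypesDeleteOrder.filter (fun t => (p ++ [x]).contains t)
          = pyResourceTypesDeleteOrder.filter (fun t => p.contains t || t == x) := by
        apply List.filter_congr; intro t _
        simp [beq_eq_decide]
      rw [hUx, hKx]
    · -- unknown type: goes to the end of the unknown block, before every known type
      have hcf : pyResourceTypesDeleteOrder.contains x = false := by simpa using hc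
      have hx1 : pvKf x = -1 := pvKf_neg hcf
      rw [pv_insertBy_append_left _ _ _ _ (by
        intro u hu
        have := hUneg u hu
        simp [this, hx1])]
      have hinsK : PySem.List.insertBy (fun a b => decide (pvKf a < pvKf b)) x K = x :: K := by
        cases hK : K with
        | nil => simp [PySem.List.insertBy]
        | cons y ys =>
          have hy : y ∈ pyResourceTypesDeleteOrder := by
            have : y ∈ K := by rw [hK]; simp
            exact List.mem_of_mem_filter this
          have : decide (pvKf x < pvKf y) = true := by
            have := pvKf_nonneg hy
            simp [hx1]; omega
          simp [PySem.List.insertBy, this]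
      rw [hinsK]
      have hUx : (p ++ [x]).filter (fun t => !pyResourceTypesDeleteOrder.contains t)
          = U ++ [x] := by
        rw [List.filter_append]
        have : [x].filter (fun t => !pyResourceTypesDeleteOrder.contains t) = [x] := by
          simp; simpa using hcf
        rw [this]
      have hKx : pyResourceTypesDeleteOrder.filter (fun t => (p ++ [x]).contains t) = K := by
        rw [hKdef]
        apply List.filter_congr; intro t ht
        have htx : (t == x) = false := by
          refine beq_false_of_ne ?_
          intro he; subst he
          simp [ht] at hcf
        have hne : t ≠ x := ne_of_beq_false htx
        simp [hne]
      rw [hUx, hKx]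
      simp

-- B's two passes, as filters + flatMaps
lemma pv_alt_eq (d : List (String × List String)) :
    order_for_deletion_py_alt d
      = (d.filter (fun q => !pyResourceTypesDeleteOrder.contains q.1)).flatMap
          (fun q => q.2.map (fun i => (q.1, i)))
        ++ (pyResourceTypesDeleteOrder.filter
              (fun t => (PySem.Dict.mk d).contains t)).flatMap
            (fun t => ((PySem.Dict.mk d).getD t []).map (fun i => (t, i))) := by
  unfold order_for_deletion_py_alt
  rw [PySem.List.foldl_if_eq_foldl_filter, PySem.List.foldl_append_eq_flatMap,
    PySem.List.foldl_if_eq_foldl_filter, PySem.List.foldl_append_eq_flatMap]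
  rfl

-- flatMap over the filtered keys = flatMap over the filtered pairs (nodup keys)
lemma pv_keys_flatMap (d : List (String × List String)) (hnd : (d.map Prod.fst).Nodup)
    (c : String → Bool) :
    ((d.map Prod.fst).filter c).flatMap
        (fun t => ((PySem.Dict.mk d).getD t []).map (fun i => (t, i)))
      = (d.filter (fun q => c q.1)).flatMap (fun q => q.2.map (fun i => (q.1, i))) := by
  have h1 : (d.map Prod.fst).filter c = (d.filter (fun q => c q.1)).map Prod.fst := by
    rw [List.filter_map]; rfl
  rw [h1, List.flatMap_map]
  apply List.flatMap_congr
  intro q hq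
  have hqd : q ∈ d := List.mem_of_mem_filter hq
  have : (PySem.Dict.mk d).getD q.1 [] = q.2 := by
    apply PySem.Dict.getD_of_mem_items (d := PySem.Dict.mk d) (k := q.1) (v := q.2) _ hnd
    exact hqd
  simp [this]

-- ===== VERDICT (by name: the statement is the Claim_ definition above) =====
theorem order_for_deletion_py_spec : Claim_equal_order_for_deletion_py := by
  intro d _ hpre
  unfold Spec_order_for_deletion_py
  unfold order_for_deletion_py
  rw [pv_alt_eq]
  -- A's nested append loop is a flatMap over the sorted key list
  have hinner : ∀ (l : List String),
      l.foldl (fun result t => ((PySem.Dict.mk d).getD t []).foldl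
          (fun res i => res ++ [(t, i)]) result) []
        = l.flatMap (fun t => ((PySem.Dict.mk d).getD t []).map (fun i => (t, i))) := by
    intro l
    have h1 : l.foldl (fun result t => ((PySem.Dict.mk d).getD t []).foldl
          (fun res i => res ++ [(t, i)]) result) []
        = l.foldl (fun result t =>
            result ++ ((PySem.Dict.mk d).getD t []).map (fun i => (t, i))) [] :=
      PySem.List.foldl_congr_mem _ _ _ _
        (by intro acc t _; rw [PySem.List.foldl_append_singleton_eq_map])
    rw [h1]
    simpa using PySem.List.foldl_append_eq_flatMap
      (fun t => ((PySem.Dict.mk d).getD t []).map (fun i => (t, i))) l []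
  have hkeys : (PySem.Dict.mk d).keys = d.map Prod.fst := rfl
  rw [hinner, hkeys]
  show (PySem.List.sorted (d.map Prod.fst) pvKf false).flatMap _ = _
  rw [pv_sorted_split (d.map Prod.fst) hpre, List.flatMap_append,
    pv_keys_flatMap d hpre (fun t => !pyResourceTypesDeleteOrder.contains t)]
  congr 1
  apply congrArg (fun l => List.flatMap _ l)
  apply List.filter_congr
  intro t _
  rw [PySem.Dict.contains_eq_decide_mem_keys, hkeys]
  simp
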